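-- pv_equiv track=rewrite | github.com/robertmorelli/gradual_typing_cinder_benchmark | detyper/cinder/plan_data.py | _split_top_level_union
-- ===== SOURCE A (Python) =====
-- def _split_top_level_union(text: str) -> list[str]:
--     parts: list[str] = []
--     current: list[str] = []
--     depth = 0
--     for char in text:
--         if char in '([{':
--             depth += 1
--         elif char in ')]}':
--             depth = max(0, depth - 1)
--         if char == '|' and depth == 0:
--             parts.append(''.join(current).strip())
--             current = []
--             continue
--         current.append(char)
--     if current:
--         parts.append(''.join(current).strip())
--     return [part for part in parts if part]
-- ===== SOURCE B (Python) =====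
-- def _cut(s):
--     depth = 0
--     for i, ch in enumerate(s):
--         if ch in '([{':
--             depth += 1
--         elif ch in ')]}':
--             depth = max(0, depth - 1)
--         elif ch == '|' and depth == 0:
--             return s[:i], s[i + 1:]
--     return s, None
--
--
-- def _split_top_level_union(text):
--     out = []
--     rest = text
--     while rest is not None:
--         seg, rest = _cut(rest)
--         seg = seg.strip()
--         if seg:
--             out.append(seg)
--     return out
-- ===== Notes on version B (the rewrite author's own statement) =====
-- stated objective: alternative
-- what changed: B replaces A's single accumulate-and-flush fold by a two-part decomposition: a head-segment cutter _cut that returns the text up to the first top-level '|' and the remaining suffix via slicing, driven by a while loop that strips and collects each segment.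
import Mathlib
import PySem

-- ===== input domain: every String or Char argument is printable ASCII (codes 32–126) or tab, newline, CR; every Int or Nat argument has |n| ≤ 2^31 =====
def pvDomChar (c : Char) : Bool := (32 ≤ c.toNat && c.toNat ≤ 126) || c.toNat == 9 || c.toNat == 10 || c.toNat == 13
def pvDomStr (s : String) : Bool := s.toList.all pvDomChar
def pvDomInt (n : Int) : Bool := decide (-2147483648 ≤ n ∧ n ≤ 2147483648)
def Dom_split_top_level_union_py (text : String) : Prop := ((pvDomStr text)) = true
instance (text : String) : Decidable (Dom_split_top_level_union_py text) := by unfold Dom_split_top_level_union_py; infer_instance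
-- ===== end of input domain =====

-- B replaces A's accumulate-and-flush fold by a head-segment cutter (prefix up to the first
-- top-level '|', plus the remaining suffix) driven by a loop that strips and collects each
-- segment (objective: alternative decomposition; no speed claim).

-- ===== PORT A =====
-- state: (parts, current, depth)
def pvAStep (st : List (List Char) × List Char × Int) (c : Char) :
    List (List Char) × List Char × Int :=
  let depth : Int :=
    if c = '(' ∨ c = '[' ∨ c = '{' then st.2.2 + 1
    else if c = ')' ∨ c = ']' ∨ c = '}' then max 0 (st.2.2 - 1)
    else st.2.2
  if c = '|' ∧ depth = 0 then (st.1 ++ [PySem.Chars.strip st.2.1], [], depth)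
  else (st.1, st.2.1 ++ [c], depth)

def split_top_level_union_py (text : String) : List String :=
  let st := text.toList.foldl pvAStep ([], [], 0)
  let parts := if st.2.1 ≠ [] then st.1 ++ [PySem.Chars.strip st.2.1] else st.1
  (parts.filter (fun p => p ≠ [])).map String.ofList

-- ===== PORT B =====
-- _cut: the segment before the first top-level '|' and the suffix after it (none = no bar)
def pvCut : List Char → Int → List Char × Option (List Char)
  | [], _ => ([], none)
  | c :: cs, depth =>
    if c = '(' ∨ c = '[' ∨ c = '{' then
      let r := pvCut cs (depth + 1); (c :: r.1, r.2)
    else if c = ')' ∨ c = ']' ∨ c = '}' then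
      let r := pvCut cs (max 0 (depth - 1)); (c :: r.1, r.2)
    else if c = '|' ∧ depth = 0 then ([], some cs)
    else
      let r := pvCut cs depth; (c :: r.1, r.2)

-- termination measure for the driver loop (cited by pvDrive's decreasing_by)
lemma pvCut_rest_lt : ∀ (cs : List Char) (d : Int) (rest : List Char),
    (pvCut cs d).2 = some rest → rest.length < cs.length := by
  intro cs
  induction cs with
  | nil => intro d rest h; simp [pvCut] at h
  | cons c cs ih =>
    intro d rest h
    simp only [pvCut] at h
    split_ifs at h with h1 h2 h3
    · exact Nat.lt_succ_of_lt (ih _ _ h)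
    · exact Nat.lt_succ_of_lt (ih _ _ h)
    · cases h; simp
    · exact Nat.lt_succ_of_lt (ih _ _ h)

-- the while loop of B: cut off a head segment, strip it, keep it if nonempty, continue
def pvDrive (cs : List Char) : List (List Char) :=
  match h : pvCut cs 0 with
  | (seg, none) =>
    let s := PySem.Chars.strip seg
    if s ≠ [] then [s] else []
  | (seg, some rest) =>
    let s := PySem.Chars.strip seg
    if s ≠ [] then s :: pvDrive rest else pvDrive rest
termination_by cs.length
decreasing_by all_goals exact pvCut_rest_lt cs 0 rest (by rw [h])

def split_top_level_union_py_alt (text : String) : List String :=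
  (pvDrive text.toList).map String.ofList

-- ===== PRECONDITION & SPEC =====
def Spec_split_top_level_union_py (text : String) (out : List String) : Prop := out = split_top_level_union_py_alt text
instance (text : String) (out : List String) : Decidable (Spec_split_top_level_union_py text out) := by unfold Spec_split_top_level_union_py; infer_instance

-- ===== CLAIM (what is proved, stated in full; the proofs are below) =====
def Claim_equal_split_top_level_union_py : Prop := ∀ (text : String), Dom_split_top_level_union_py text → Spec_split_top_level_union_py text (split_top_level_union_py text)

-- ===== LEMMAS AND PROOFS =====

-- finalisation of A's loop state: append the (stripped) trailing segment, drop empties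
def pvAFinal (st : List (List Char) × List Char × Int) : List (List Char) :=
  (if st.2.1 ≠ [] then st.1 ++ [PySem.Chars.strip st.2.1] else st.1).filter (fun p => p ≠ [])

lemma pvAFinal_eq (st : List (List Char) × List Char × Int) :
    pvAFinal st = st.1.filter (fun p => p ≠ []) ++
      (if PySem.Chars.strip st.2.1 ≠ [] then [PySem.Chars.strip st.2.1] else []) := by
  unfold pvAFinal
  by_cases h : st.2.1 = []
  · simp [h, show PySem.Chars.strip ([] : List Char) = [] from by decide]
  · rw [if_pos h, List.filter_append]
    by_cases hs : PySem.Chars.strip st.2.1 = [] <;> simp [hs]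

-- B's result starting with a pending prefix 'cur' and depth d
def pvSegAux (cur cs : List Char) (d : Int) : List (List Char) :=
  match pvCut cs d with
  | (seg, none) =>
    if PySem.Chars.strip (cur ++ seg) ≠ [] then [PySem.Chars.strip (cur ++ seg)] else []
  | (seg, some rest) =>
    (if PySem.Chars.strip (cur ++ seg) ≠ [] then [PySem.Chars.strip (cur ++ seg)] else [])
      ++ pvDrive rest

lemma pvSegAux_nil (cs : List Char) : pvSegAux [] cs 0 = pvDrive cs := by
  unfold pvSegAux
  rw [pvDrive]
  rcases h : pvCut cs 0 with ⟨seg, orest⟩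
  cases orest <;> by_cases hs : PySem.Chars.strip seg = [] <;> simp [hs]

lemma pvSegAux_push (cur : List Char) (c : Char) (cs : List Char) (d d' : Int)
    (hcut : pvCut (c :: cs) d = ((pvCut cs d').1.cons c, (pvCut cs d').2)) :
    pvSegAux cur (c :: cs) d = pvSegAux (cur ++ [c]) cs d' := by
  unfold pvSegAux
  rw [hcut]
  rcases h : pvCut cs d' with ⟨seg, orest⟩
  cases orest <;> simp [List.append_assoc]

lemma pvSegAux_bar (c : Char) (cur cs : List Char) (d : Int)
    (hcut : pvCut (c :: cs) d = ([], some cs)) :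
    pvSegAux cur (c :: cs) d
      = (if PySem.Chars.strip cur ≠ [] then [PySem.Chars.strip cur] else []) ++ pvDrive cs := by
  unfold pvSegAux
  rw [hcut]
  by_cases hs : PySem.Chars.strip cur = [] <;> simp [hs]

lemma pv_main : ∀ (cs : List Char) (parts : List (List Char)) (cur : List Char) (d : Int),
    pvAFinal (cs.foldl pvAStep (parts, cur, d))
      = parts.filter (fun p => p ≠ []) ++ pvSegAux cur cs d := by
  intro cs
  induction cs with
  | nil =>
    intro parts cur d
    rw [List.foldl_nil, pvAFinal_eq]
    unfold pvSegAux
    simp [pvCut]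
  | cons c cs ih =>
    intro parts cur d
    rw [List.foldl_cons]
    set d' : Int := (if c = '(' ∨ c = '[' ∨ c = '{' then d + 1
      else if c = ')' ∨ c = ']' ∨ c = '}' then max 0 (d - 1) else d) with hd'
    have hstep : pvAStep (parts, cur, d) c =
        if c = '|' ∧ d' = 0 then (parts ++ [PySem.Chars.strip cur], [], d')
        else (parts, cur ++ [c], d') := rfl
    by_cases hbar : c = '|' ∧ d' = 0
    · -- top-level bar: flush the current segment
      rw [hstep, if_pos hbar]
      have hcnotbr : ¬ (c = '(' ∨ c = '[' ∨ c = '{') := by rcases hbar with ⟨rfl, _⟩; decide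
      have hcnotcl : ¬ (c = ')' ∨ c = ']' ∨ c = '}') := by rcases hbar with ⟨rfl, _⟩; decide
      have hd0 : d = 0 := by
        have := hbar.2
        rw [hd'] at this
        rw [if_neg hcnotbr, if_neg hcnotcl] at this
        exact this
      have hcut : pvCut (c :: cs) d = ([], some cs) := by
        simp only [pvCut, if_neg hcnotbr, if_neg hcnotcl]
        rw [if_pos ⟨hbar.1, hd0⟩]
      rw [ih, hbar.2, pvSegAux_nil, pvSegAux_bar c cur cs d hcut,
        List.filter_append, List.append_assoc]
      congr 1
      by_cases hs : PySem.Chars.strip cur = [] <;> simp [hs]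
    · rw [hstep, if_neg hbar, ih]
      congr 1
      rw [pvSegAux_push cur c cs d d']
      -- remaining: the cut equation for a non-bar head character
      simp only [pvCut]
      by_cases h1 : c = '(' ∨ c = '[' ∨ c = '{'
      · rw [if_pos h1]
        have : d' = d + 1 := by rw [hd', if_pos h1]
        rw [this]
      · rw [if_neg h1]
        by_cases h2 : c = ')' ∨ c = ']' ∨ c = '}'
        · rw [if_pos h2]
          have : d' = max 0 (d - 1) := by rw [hd', if_neg h1, if_pos h2]
          rw [this]
        · rw [if_neg h2]
          have hdd : d' = d := by rw [hd', if_neg h1, if_neg h2]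
          have : ¬ (c = '|' ∧ d = 0) := by rw [← hdd]; exact hbar
          rw [if_neg this, hdd]

-- ===== VERDICT (by name: the statement is the Claim_ definition above) =====
theorem split_top_level_union_py_spec : Claim_equal_split_top_level_union_py := by
  intro text _
  unfold Spec_split_top_level_union_py
  unfold split_top_level_union_py split_top_level_union_py_alt
  have h := pv_main text.toList [] [] 0
  simp only [List.filter_nil, List.nil_append, pvSegAux_nil] at h
  show (pvAFinal (text.toList.foldl pvAStep ([], [], 0))).map String.ofList = _
  rw [h]
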